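-- pv_equiv track=rewrite | github.com/Nikhilbhanderi91/AI-Answer-Sheet-Evaluation | AI_Answer_Evaluation/app.py | split_answers
-- ===== SOURCE A (Python) =====
-- def split_answers(text):
--     answers = {}
--     lines = text.split("\n")
--
--     current_q = None
--     current_ans = ""
--
--     for line in lines:
--         line = line.strip()
--
--         if line.startswith("Q"):
--             if current_q:
--                 answers[current_q] = current_ans.strip()
--
--             current_q = line.split(":")[0]
--             current_ans = line
--         else:
--             current_ans += " " + line
--
--     if current_q:
--         answers[current_q] = current_ans.strip()
--
--     return answers
-- ===== SOURCE B (Python) =====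
-- def split_answers(text):
--     lines = [ln.strip() for ln in text.split("\n")]
--     bounds = [i for i, ln in enumerate(lines) if ln.startswith("Q")]
--     ends = bounds[1:] + [len(lines)]
--     answers = {}
--     for start, end in zip(bounds, ends):
--         block = lines[start:end]
--         answers[block[0].split(":")[0]] = " ".join(block).strip()
--     return answers
-- ===== Notes on version B (the rewrite author's own statement) =====
-- stated objective: alternative
-- what changed: A's single accumulate-and-flush loop with mutable current_q/current_ans state is replaced by a two-pass decomposition: strip all lines, collect the header-boundary indices, then slice each block out between consecutive boundaries and join it with single spaces.
import Mathlib
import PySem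

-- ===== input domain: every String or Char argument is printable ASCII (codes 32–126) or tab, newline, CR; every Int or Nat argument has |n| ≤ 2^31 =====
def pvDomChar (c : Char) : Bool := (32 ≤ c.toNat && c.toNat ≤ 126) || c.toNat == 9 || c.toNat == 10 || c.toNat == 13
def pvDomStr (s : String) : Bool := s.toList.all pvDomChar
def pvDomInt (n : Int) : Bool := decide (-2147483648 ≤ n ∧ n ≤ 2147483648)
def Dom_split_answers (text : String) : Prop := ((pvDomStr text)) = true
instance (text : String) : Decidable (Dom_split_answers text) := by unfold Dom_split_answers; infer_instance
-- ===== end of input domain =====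

-- B replaces A's single accumulate-and-flush loop by a two-pass decomposition (collect the header
-- indices, then slice each block out of the stripped lines); objective: alternative, not faster.

-- ===== PORT A =====
-- shared helper (the expression  line.split(":")[0]  occurs verbatim in A and in B):
-- split(":") with a non-empty separator never returns an empty list, so [0] is its head.
def pvKey (l : List Char) : List Char := (PySem.Chars.splitOn l [':']).headD []

-- `if current_q:` — current_q is None or line.split(":")[0] of a line starting with "Q"
-- (hence never the empty string), so Python's truthiness test is exactly `current_q is not None`:
-- ported as the Option match.
def saFlush (answers : PySem.Dict (List Char) (List Char)) (q : Option (List Char))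
    (ans : List Char) : PySem.Dict (List Char) (List Char) :=
  match q with
  | none => answers
  | some k => answers.insert k (PySem.Chars.strip ans)

def saLoop (lines : List (List Char)) (answers : PySem.Dict (List Char) (List Char))
    (q : Option (List Char)) (ans : List Char) : PySem.Dict (List Char) (List Char) :=
  match lines with
  | [] => saFlush answers q ans                       -- final `if current_q: answers[...] = ...`
  | line :: rest =>
      let l := PySem.Chars.strip line
      if PySem.Chars.startswith l ['Q'] then
        saLoop rest (saFlush answers q ans) (some (pvKey l)) l
      else
        saLoop rest answers q (ans ++ ' ' :: l)       -- current_ans += " " + line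

def split_answers (text : String) : List (String × String) :=
  (saLoop (PySem.Chars.splitOn text.toList ['\n']) PySem.Dict.empty none []).items.map
    (fun p => (String.ofList p.1, String.ofList p.2))

-- ===== PORT B =====
-- block[0]: every zipped pair has start < end, so the block is non-empty and [0] is its head.
def sbStep (lines : List (List Char)) (answers : PySem.Dict (List Char) (List Char))
    (se : Int × Int) : PySem.Dict (List Char) (List Char) :=
  let block := PySem.List.slice lines (some se.1) (some se.2)   -- lines[start:end]
  answers.insert (pvKey (block.headD [])) (PySem.Chars.strip (PySem.Chars.join [' '] block))

def split_answers_alt (text : String) : List (String × String) :=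
  let lines := (PySem.Chars.splitOn text.toList ['\n']).map PySem.Chars.strip
  let bounds := (PySem.List.enumerate lines).filterMap
    (fun p => if PySem.Chars.startswith p.2 ['Q'] then some p.1 else none)
  let ends := bounds.drop 1 ++ [(lines.length : Int)]
  ((bounds.zip ends).foldl (sbStep lines) PySem.Dict.empty).items.map
    (fun p => (String.ofList p.1, String.ofList p.2))

-- ===== PRECONDITION & SPEC =====
def Spec_split_answers (text : String) (out : List (String × String)) : Prop := out = split_answers_alt text
instance (text : String) (out : List (String × String)) : Decidable (Spec_split_answers text out) := by unfold Spec_split_answers; infer_instance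

-- ===== CLAIM (what is proved, stated in full; the proofs are below) =====
def Claim_equal_split_answers : Prop := ∀ (text : String), Dom_split_answers text → Spec_split_answers text (split_answers text)

-- ===== LEMMAS AND PROOFS =====

-- `nhB l` : l is NOT a header line
def nhB (l : List Char) : Bool := !PySem.Chars.startswith l ['Q']

-- A's loop on already-stripped lines
def gA : List (List Char) → PySem.Dict (List Char) (List Char) → Option (List Char) → List Char →
    PySem.Dict (List Char) (List Char)
  | [], d, q, ans => saFlush d q ans
  | l :: ls, d, q, ans =>
      if PySem.Chars.startswith l ['Q'] then gA ls (saFlush d q ans) (some (pvKey l)) l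
      else gA ls d q (ans ++ ' ' :: l)

-- common reference semantics: recursion over the blocks of the stripped lines
def specF : List (List Char) → PySem.Dict (List Char) (List Char) →
    PySem.Dict (List Char) (List Char)
  | [], d => d
  | l :: ls, d =>
      if PySem.Chars.startswith l ['Q'] then
        specF (ls.dropWhile nhB)
          (d.insert (pvKey l)
            (PySem.Chars.strip (l ++ (ls.takeWhile nhB).flatMap (fun b => ' ' :: b))))
      else specF ls d
termination_by L _ => L.length
decreasing_by
  · have := List.length_dropWhile_le (p := nhB) (l := ls); simpa using Nat.lt_succ_of_le this
  · simp

-- the header indices, in Nat form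
def natBounds : List (List Char) → List Nat
  | [] => []
  | l :: ls => if PySem.Chars.startswith l ['Q'] then 0 :: (natBounds ls).map (· + 1)
               else (natBounds ls).map (· + 1)

-- B's fold step, in Nat form
def stepN (lines : List (List Char)) (d : PySem.Dict (List Char) (List Char))
    (se : Nat × Nat) : PySem.Dict (List Char) (List Char) :=
  d.insert (pvKey (((lines.drop se.1).take (se.2 - se.1)).headD []))
    (PySem.Chars.strip (PySem.Chars.join [' '] ((lines.drop se.1).take (se.2 - se.1))))

theorem saLoop_eq_gA (ls : List (List Char)) (d : PySem.Dict (List Char) (List Char))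
    (q : Option (List Char)) (ans : List Char) :
    saLoop ls d q ans = gA (ls.map PySem.Chars.strip) d q ans := by
  induction ls generalizing d q ans with
  | nil => rfl
  | cons l ls ih => simp only [saLoop, gA, List.map_cons]; split <;> apply ih

theorem join_flat (h : List Char) (body : List (List Char)) :
    PySem.Chars.join [' '] (h :: body) = h ++ body.flatMap (fun b => ' ' :: b) := by
  induction body generalizing h with
  | nil => simp [PySem.Chars.join_singleton]
  | cons b bs ih => rw [PySem.Chars.join_cons_cons, ih]; simp

theorem gA_pending (ls : List (List Char)) (d : PySem.Dict (List Char) (List Char))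
    (k ans : List Char) :
    gA ls d (some k) ans =
      specF (ls.dropWhile nhB)
        (d.insert k (PySem.Chars.strip (ans ++ (ls.takeWhile nhB).flatMap (fun b => ' ' :: b)))) := by
  induction ls generalizing d k ans with
  | nil => simp [gA, saFlush, specF]
  | cons l ls ih =>
      by_cases hl : PySem.Chars.startswith l ['Q']
      · rw [gA]
        simp only [hl, if_true]
        rw [ih, List.dropWhile_cons, List.takeWhile_cons]
        simp [nhB, hl, saFlush, specF]
      · rw [gA]
        simp only [hl]
        rw [ih d k (ans ++ ' ' :: l)]
        have h1 : List.dropWhile nhB (l :: ls) = List.dropWhile nhB ls := by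
          simp [List.dropWhile_cons, nhB, hl]
        have h2 : List.takeWhile nhB (l :: ls) = l :: List.takeWhile nhB ls := by
          simp [List.takeWhile_cons, nhB, hl]
        rw [h1, h2]
        simp

theorem gA_none (ls : List (List Char)) (d : PySem.Dict (List Char) (List Char)) (ans : List Char) :
    gA ls d none ans = specF ls d := by
  induction ls generalizing d ans with
  | nil => simp [gA, saFlush, specF]
  | cons l ls ih =>
      by_cases hl : PySem.Chars.startswith l ['Q']
      · rw [gA]; simp only [hl, if_true]
        rw [gA_pending]
        simp [specF, hl, saFlush]
      · rw [gA]; simp only [hl]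
        rw [ih, specF]; simp [hl]

theorem specF_dropWhile (ls : List (List Char)) (d : PySem.Dict (List Char) (List Char)) :
    specF (ls.dropWhile nhB) d = specF ls d := by
  induction ls with
  | nil => rfl
  | cons l ls ih =>
      by_cases hl : PySem.Chars.startswith l ['Q']
      · simp [List.dropWhile_cons, nhB, hl]
      · rw [List.dropWhile_cons]
        simp only [nhB, hl, Bool.not_false, if_true]
        rw [ih, specF]; simp [hl]

theorem shift_map (nb : List Nat) (s : Int) :
    (nb.map (· + 1)).map (fun (n : Nat) => s + (n : Int)) = nb.map (fun (n : Nat) => (s + 1) + (n : Int)) := by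
  rw [List.map_map]
  apply List.map_congr_left
  intro n _
  simp only [Function.comp_apply]
  push_cast
  ring

theorem bnds_eq (L : List (List Char)) (s : Int) :
    (PySem.List.enumerate L s).filterMap
        (fun p => if PySem.Chars.startswith p.2 ['Q'] then some p.1 else none)
      = (natBounds L).map (fun (n : Nat) => s + (n : Int)) := by
  induction L generalizing s with
  | nil => simp [PySem.List.enumerate_nil, natBounds]
  | cons l ls ih =>
      rw [PySem.List.enumerate_cons, List.filterMap_cons]
      by_cases hl : PySem.Chars.startswith l ['Q']
      · rw [if_pos hl, ih (s + 1)]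
        simp only [natBounds, hl, if_true, List.map_cons]
        rw [shift_map]
        simp
      · rw [if_neg hl, ih (s + 1)]
        simp only [natBounds, hl, Bool.false_eq_true, if_false]
        rw [shift_map]

theorem natBounds_none (L : List (List Char)) (h : natBounds L = []) :
    L.takeWhile nhB = L ∧ L.dropWhile nhB = [] := by
  induction L with
  | nil => simp
  | cons l ls ih =>
      by_cases hl : PySem.Chars.startswith l ['Q']
      · simp [natBounds, hl] at h
      · simp [natBounds, hl] at h
        obtain ⟨h1, h2⟩ := ih h
        simp [List.takeWhile_cons, List.dropWhile_cons, nhB, hl, h1, h2]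

theorem natBounds_head (L : List (List Char)) (b : Nat) (r : List Nat)
    (h : natBounds L = b :: r) : L.take b = L.takeWhile nhB := by
  induction L generalizing b r with
  | nil => simp [natBounds] at h
  | cons l ls ih =>
      by_cases hl : PySem.Chars.startswith l ['Q']
      · simp [natBounds, hl] at h
        obtain ⟨hb, -⟩ := h
        simp [← hb, List.takeWhile_cons, nhB, hl]
      · simp only [natBounds, hl, Bool.false_eq_true, if_false] at h
        cases hnb : natBounds ls with
        | nil => rw [hnb] at h; simp at h
        | cons b' r' =>
            rw [hnb] at h; simp at h
            obtain ⟨hb, -⟩ := h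
            rw [← hb]
            simp [List.takeWhile_cons, nhB, hl, ih b' r' hnb]

theorem stepN_succ (x : List Char) (xs : List (List Char))
    (d : PySem.Dict (List Char) (List Char)) (p : Nat × Nat) :
    stepN (x :: xs) d (p.1 + 1, p.2 + 1) = stepN xs d p := by
  unfold stepN
  simp [List.drop_succ_cons, Nat.add_sub_add_right]

theorem bfold_eq (L : List (List Char)) (d : PySem.Dict (List Char) (List Char)) :
    ((natBounds L).zip ((natBounds L).drop 1 ++ [L.length])).foldl (stepN L) d = specF L d := by
  induction L generalizing d with
  | nil => simp [natBounds, specF]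
  | cons l ls ih =>
      by_cases hl : PySem.Chars.startswith l ['Q']
      · -- header line: the first zipped pair is the block that starts here
        cases hnb : natBounds ls with
        | nil =>
            have hno := natBounds_none ls hnb
            simp only [natBounds, hl, if_true, hnb, List.map_nil, List.drop_succ_cons,
              List.drop_nil, List.nil_append, List.length_cons]
            rw [List.zip_cons_cons]
            simp only [List.zip_nil_left, List.foldl_cons, List.foldl_nil]
            rw [specF]
            simp only [hl, if_true, hno.2]
            rw [specF]
            unfold stepN
            simp only [List.drop_zero, Nat.sub_zero]
            rw [List.take_of_length_le (by simp)]
            rw [join_flat, hno.1]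
            simp
        | cons b0 nb' =>
            have htk := natBounds_head ls b0 nb' hnb
            simp only [natBounds, hl, if_true, hnb, List.map_cons, List.drop_succ_cons,
              List.drop_zero, List.length_cons]
            rw [List.cons_append, List.zip_cons_cons]
            rw [List.foldl_cons]
            have hzip : (((b0 + 1) :: nb'.map (· + 1)).zip (nb'.map (· + 1) ++ [ls.length + 1]))
                = ((b0 :: nb').zip (nb' ++ [ls.length])).map (Prod.map (· + 1) (· + 1)) := by
              have h2 : nb'.map (· + 1) ++ [ls.length + 1] = (nb' ++ [ls.length]).map (· + 1) := by
                simp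
              have h3 : (b0 + 1) :: nb'.map (· + 1) = (b0 :: nb').map (· + 1) := by simp
              rw [h2, h3, List.zip_map]
            rw [hzip, List.foldl_map]
            have hfold : ∀ (init : PySem.Dict (List Char) (List Char)),
                ((b0 :: nb').zip (nb' ++ [ls.length])).foldl
                  (fun d' p => stepN (l :: ls) d' (Prod.map (· + 1) (· + 1) p)) init
                = ((b0 :: nb').zip (nb' ++ [ls.length])).foldl (stepN ls) init := by
              intro init
              apply PySem.List.foldl_congr_mem
              intro acc p _
              simpa [Prod.map] using stepN_succ l ls acc p
            rw [hfold]
            have hrest : (b0 :: nb').zip (nb' ++ [ls.length])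
                = (natBounds ls).zip ((natBounds ls).drop 1 ++ [ls.length]) := by
              rw [hnb]; simp
            rw [hrest, ih]
            have hstep : stepN (l :: ls) d (0, b0 + 1)
                = d.insert (pvKey l)
                    (PySem.Chars.strip (l ++ (ls.takeWhile nhB).flatMap (fun b => ' ' :: b))) := by
              unfold stepN
              simp only [List.drop_zero, Nat.sub_zero]
              rw [List.take_succ_cons, htk, join_flat]
              simp
            rw [hstep]
            rw [specF]
            simp only [hl, if_true]
            rw [specF_dropWhile]
      · -- non-header line: all boundary pairs shift by one
        simp only [natBounds, hl, Bool.false_eq_true, if_false, List.length_cons]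
        have emap : ((natBounds ls).map (· + 1)).drop 1 ++ [ls.length + 1]
            = ((natBounds ls).drop 1 ++ [ls.length]).map (· + 1) := by
          simp [List.map_drop]
        rw [emap, List.zip_map, List.foldl_map]
        have hfold : ∀ (init : PySem.Dict (List Char) (List Char)),
            ((natBounds ls).zip ((natBounds ls).drop 1 ++ [ls.length])).foldl
              (fun d' p => stepN (l :: ls) d' (Prod.map (· + 1) (· + 1) p)) init
            = ((natBounds ls).zip ((natBounds ls).drop 1 ++ [ls.length])).foldl (stepN ls) init := by
          intro init
          apply PySem.List.foldl_congr_mem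
          intro acc p _
          simpa [Prod.map] using stepN_succ l ls acc p
        rw [hfold, ih]
        rw [specF]
        simp [hl]

theorem sbStep_cast (L : List (List Char)) (d : PySem.Dict (List Char) (List Char))
    (p : Nat × Nat) : sbStep L d ((p.1 : Int), (p.2 : Int)) = stepN L d p := by
  unfold sbStep stepN
  rw [PySem.List.slice_natCast]

theorem alt_eq_fold (text : String) :
    split_answers_alt text =
      (((natBounds ((PySem.Chars.splitOn text.toList ['\n']).map PySem.Chars.strip)).zip
          ((natBounds ((PySem.Chars.splitOn text.toList ['\n']).map PySem.Chars.strip)).drop 1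
            ++ [((PySem.Chars.splitOn text.toList ['\n']).map PySem.Chars.strip).length])).foldl
        (stepN ((PySem.Chars.splitOn text.toList ['\n']).map PySem.Chars.strip))
        PySem.Dict.empty).items.map (fun p => (String.ofList p.1, String.ofList p.2)) := by
  unfold split_answers_alt
  dsimp only
  set L := (PySem.Chars.splitOn text.toList ['\n']).map PySem.Chars.strip with hL
  rw [bnds_eq L 0]
  have hb : (natBounds L).map (fun (n : Nat) => (0 : Int) + (n : Int))
      = (natBounds L).map (fun (n : Nat) => (n : Int)) := by simp
  rw [hb]
  have hends : ((natBounds L).map (fun (n : Nat) => (n : Int))).drop 1 ++ [(L.length : Int)]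
      = ((natBounds L).drop 1 ++ [L.length]).map (fun (n : Nat) => (n : Int)) := by
    simp [List.map_drop]
  rw [hends, List.zip_map, List.foldl_map]
  congr 2
  apply PySem.List.foldl_congr_mem
  intro acc p _
  simpa [Prod.map] using sbStep_cast L acc p

-- ===== VERDICT (by name: the statement is the Claim_ definition above) =====
theorem split_answers_spec : Claim_equal_split_answers := by
  intro text _
  unfold Spec_split_answers split_answers
  rw [saLoop_eq_gA, gA_none, alt_eq_fold, bfold_eq]
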